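-- pv_equiv track=rewrite | github.com/camillebrl/doc_custom_kie | src/doc_custom_extraction/inference.py | post_process_merged_entities
-- ===== SOURCE A (Python) =====
-- def post_process_merged_entities(
--     merged_words: list[str | None],
--     merged_boxes: list[tuple[int, int, int, int] | None],
--     merged_labels: list[str | None],
-- ) -> tuple[list[str], list[tuple[int, int, int, int]], list[str]]:
--     """Post-process MBIO entities to correct overlaps and refine predictions.
--
--     Parcourt les entités fusionnées (avec des `None` marquant celles à supprimer),
--     regroupe celles du même type très proches ou chevauchantes,
--     puis filtre les éléments marqués pour suppression.
--
--     Args: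
--         merged_words (List[Optional[str]]): Liste de mots fusionnés ou `None`.
--         merged_boxes (List[Optional[Tuple[int, int, int, int]]]): Boîtes ou `None`.
--         merged_labels (List[Optional[str]]): Labels ou `None`.
--
--     Returns:
--         Tuple[
--             List[str],
--             List[Tuple[int, int, int, int]],
--             List[str],
--         ]:
--             - filtered_words: mots gardés (sans `None`).
--             - filtered_boxes: boîtes correspondantes.
--             - filtered_labels: labels correspondants.
--     """
--     if not merged_words:
--         return [], [], []
--
--     # Dictionnaire label -> liste de (mot, boîte, index)
--     entities_by_type: dict[str, list[tuple[str, tuple[int, int, int, int], int]]] = {}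
--
--     for i, (word, box, label) in enumerate(zip(merged_words, merged_boxes, merged_labels, strict=False)):
--         # Ignorer None et "O"
--         if label is None or label == "O":
--             continue
--         if word is None or box is None:
--             continue
--
--         entities_by_type.setdefault(label, []).append((word, box, i))
--
--     # Fusionner les entités proches du même type
--     for label, entities in entities_by_type.items():  # noqa: B007
--         if len(entities) <= 1:
--             continue
--
--         entities.sort(key=lambda x: x[1][0])  # Trier par x1
--         j = 0
--         while j < len(entities) - 1:
--             w1, b1, idx1 = entities[j]
--             w2, b2, idx2 = entities[j + 1]
--
--             # Distance horizontale
--             h_dist = b2[0] - b1[2]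
--             if h_dist < 50:
--                 # Fusion
--                 new_word = f"{w1} {w2}"
--                 new_box = (
--                     min(b1[0], b2[0]),
--                     min(b1[1], b2[1]),
--                     max(b1[2], b2[2]),
--                     max(b1[3], b2[3]),
--                 )
--                 entities[j] = (new_word, new_box, idx1)
--
--                 # Marquer la suivante pour suppression
--                 merged_words[idx2] = None
--                 merged_boxes[idx2] = None
--                 merged_labels[idx2] = None
--
--                 entities.pop(j + 1)
--             else:
--                 j += 1
--
--     # Filtrer les None et reconstruire les listes finales
--     filtered_words: list[str] = []
--     filtered_boxes: list[tuple[int, int, int, int]] = []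
--     filtered_labels: list[str] = []
--
--     for w, b, l in zip(merged_words, merged_boxes, merged_labels, strict=False):
--         if w is not None and b is not None and l is not None:
--             filtered_words.append(w)
--             filtered_boxes.append(b)
--             filtered_labels.append(l)
--
--     return filtered_words, filtered_boxes, filtered_labels
-- ===== SOURCE B (Python) =====
-- def post_process_merged_entities(
--     merged_words,
--     merged_boxes,
--     merged_labels,
-- ):
--     """Single forward pass per label over x1-sorted (x1, x2, index) triples,
--     accumulating a running right edge and a set of deleted indices, instead of
--     repeated in-place pops; the inputs are not mutated (return value identical)."""
--     zipped = list(enumerate(zip(merged_words, merged_boxes, merged_labels)))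
--
--     groups = {}
--     for i, (word, box, label) in zipped:
--         if word is not None and box is not None and label is not None and label != "O":
--             groups.setdefault(label, []).append((box[0], box[2], i))
--
--     deleted = set()
--     for triples in groups.values():
--         triples.sort(key=lambda t: t[0])
--         if triples:
--             max_x2 = triples[0][1]
--             for x1, x2, idx in triples[1:]:
--                 if x1 - max_x2 < 50:
--                     deleted.add(idx)
--                     max_x2 = max(max_x2, x2)
--                 else:
--                     max_x2 = x2
--
--     out_words, out_boxes, out_labels = [], [], []
--     for i, (w, b, l) in zipped:
--         if i not in deleted and w is not None and b is not None and l is not None: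
--             out_words.append(w)
--             out_boxes.append(b)
--             out_labels.append(l)
--     return out_words, out_boxes, out_labels
-- ===== Notes on version B (the rewrite author's own statement) =====
-- stated objective: faster
-- what changed: Per label, instead of repeatedly merging adjacent entities with in-place list.pop and marking the input lists None, B does one forward pass over the x1-sorted (x1,x2,index) triples keeping a running right edge and a set of deleted indices, then filters by index in a single pass without mutating the inputs.
import Mathlib
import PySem

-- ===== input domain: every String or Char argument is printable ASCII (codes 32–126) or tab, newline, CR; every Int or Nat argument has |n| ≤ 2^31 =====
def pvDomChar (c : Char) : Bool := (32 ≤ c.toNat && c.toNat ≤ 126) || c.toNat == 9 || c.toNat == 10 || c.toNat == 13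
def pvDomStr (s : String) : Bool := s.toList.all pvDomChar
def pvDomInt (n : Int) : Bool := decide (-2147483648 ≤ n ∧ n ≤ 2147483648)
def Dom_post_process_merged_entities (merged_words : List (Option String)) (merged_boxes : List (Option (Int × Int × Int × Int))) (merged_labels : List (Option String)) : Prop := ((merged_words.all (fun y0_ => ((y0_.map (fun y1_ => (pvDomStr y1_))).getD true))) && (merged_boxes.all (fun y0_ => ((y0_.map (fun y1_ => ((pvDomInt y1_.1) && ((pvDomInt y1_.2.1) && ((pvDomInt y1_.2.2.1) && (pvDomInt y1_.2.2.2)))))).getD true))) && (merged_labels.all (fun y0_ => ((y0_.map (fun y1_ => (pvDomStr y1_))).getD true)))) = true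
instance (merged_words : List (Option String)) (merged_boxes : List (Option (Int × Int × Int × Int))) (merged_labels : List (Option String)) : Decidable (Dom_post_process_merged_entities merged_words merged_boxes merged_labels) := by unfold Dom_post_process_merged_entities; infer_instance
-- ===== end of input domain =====

-- B replaces A's per-label in-place pop-merge loop and None-marking of the input lists by one
-- sorted forward pass collecting a set of deleted indices (A mutates its argument lists in place;
-- B does not — the equivalence proved here is about the return value, which is identical).


-- ===== PORT A =====
-- box = (x1, y1, x2, y2); A groups by label into a dict of (word, box, index) lists
abbrev pvBox := Int × Int × Int × Int
abbrev pvRow := Option String × Option pvBox × Option String   -- one zipped row (word, box, label)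
abbrev pvEntA := String × pvBox × Int

-- the grouping loop of A ('for i, (word, box, label) in enumerate(zip(...))')
def pvGroupStepA (d : PySem.Dict String (List pvEntA)) (p : Int × pvRow) : PySem.Dict String (List pvEntA) :=
  match p.2.2.2 with
  | none => d
  | some lab =>
    if lab = "O" then d
    else
      match p.2.1, p.2.2.1 with
      | some w, some b => d.modify lab [] (· ++ [(w, b, p.1)])
      | _, _ => d

-- A's 'while j < len(entities) - 1' merge loop; entities[j] = new / entities.pop(j+1) become
-- List.set / List.eraseIdx (index j+1 is always in range there, so eraseIdx = pop exactly);
-- the indices stored by enumerate are ≥ 0, so 'merged_words[idx2] = None' is List.set idx2.toNat.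
def pvMergeLoop : Nat → List pvEntA → Nat → List (Option String) → List (Option pvBox) →
    List (Option String) → List (Option String) × List (Option pvBox) × List (Option String)
  | 0, _, _, mw, mb, ml => (mw, mb, ml)   -- fuel, never exhausted when started with the list's length
  | fuel + 1, entities, j, mw, mb, ml =>
    if h : j < entities.length - 1 then
      let e1 := entities[j]'(by omega)
      let e2 := entities[j + 1]'(by omega)
      if e2.2.1.1 - e1.2.1.2.2.1 < 50 then
        pvMergeLoop fuel
          ((entities.set j
              (e1.1 ++ " " ++ e2.1,
               (min e1.2.1.1 e2.2.1.1, min e1.2.1.2.1 e2.2.1.2.1,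
                max e1.2.1.2.2.1 e2.2.1.2.2.1, max e1.2.1.2.2.2 e2.2.1.2.2.2),
               e1.2.2)).eraseIdx (j + 1))
          j (mw.set e2.2.2.toNat none) (mb.set e2.2.2.toNat none) (ml.set e2.2.2.toNat none)
      else
        pvMergeLoop fuel entities (j + 1) mw mb ml
    else (mw, mb, ml)

def post_process_merged_entities (merged_words : List (Option String)) (merged_boxes : List (Option (Int × Int × Int × Int))) (merged_labels : List (Option String)) : List String × (List (Int × Int × Int × Int)) × List String :=
  if merged_words = [] then ([], [], [])
  else
    let entitiesByType :=
      (PySem.List.enumerate (merged_words.zip (merged_boxes.zip merged_labels))).foldl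
        pvGroupStepA PySem.Dict.empty
    let st :=
      entitiesByType.items.foldl
        (fun (s : List (Option String) × List (Option pvBox) × List (Option String)) kv =>
          if kv.2.length ≤ 1 then s
          else
            pvMergeLoop (PySem.List.sorted kv.2 (fun e => e.2.1.1) false).length
              (PySem.List.sorted kv.2 (fun e => e.2.1.1) false) 0 s.1 s.2.1 s.2.2)
        (merged_words, merged_boxes, merged_labels)
    (st.1.zip (st.2.1.zip st.2.2)).foldl
      (fun acc t =>
        match t with
        | (some w, some b, some l) => (acc.1 ++ [w], acc.2.1 ++ [b], acc.2.2 ++ [l])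
        | _ => acc)
      ([], [], [])

-- ===== PORT B =====
-- B keeps only (x1, x2, index) per entity
def pvGroupStepB (d : PySem.Dict String (List (Int × Int × Int))) (p : Int × pvRow) :
    PySem.Dict String (List (Int × Int × Int)) :=
  match p.2.1, p.2.2.1, p.2.2.2 with
  | some _, some b, some lab =>
      if lab = "O" then d else d.modify lab [] (· ++ [(b.1, b.2.2.1, p.1)])
  | _, _, _ => d

-- one forward pass over the x1-sorted triples of one label, running right edge + deleted set
def pvScanGroup (del : PySem.Set Int) (tris : List (Int × Int × Int)) : PySem.Set Int :=
  match PySem.List.sorted tris (fun t => t.1) false with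
  | [] => del
  | t0 :: rest =>
      (rest.foldl
        (fun (st : Int × PySem.Set Int) t =>
          if t.1 - st.1 < 50 then (max st.1 t.2.1, PySem.Set.add st.2 t.2.2)
          else (t.2.1, st.2))
        (t0.2.1, del)).2

def post_process_merged_entities_alt (merged_words : List (Option String)) (merged_boxes : List (Option (Int × Int × Int × Int))) (merged_labels : List (Option String)) : List String × (List (Int × Int × Int × Int)) × List String :=
  let zipped := PySem.List.enumerate (merged_words.zip (merged_boxes.zip merged_labels))
  let groups := zipped.foldl pvGroupStepB PySem.Dict.empty
  let deleted := groups.items.foldl (fun del kv => pvScanGroup del kv.2) PySem.Set.empty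
  zipped.foldl
    (fun acc p =>
      if PySem.Set.contains deleted p.1 then acc
      else
        match p.2 with
        | (some w, some b, some l) => (acc.1 ++ [w], acc.2.1 ++ [b], acc.2.2 ++ [l])
        | _ => acc)
    ([], [], [])

-- ===== PRECONDITION & SPEC =====
def Spec_post_process_merged_entities (merged_words : List (Option String)) (merged_boxes : List (Option (Int × Int × Int × Int))) (merged_labels : List (Option String)) (out : List String × (List (Int × Int × Int × Int)) × List String) : Prop := out = post_process_merged_entities_alt merged_words merged_boxes merged_labels
instance (merged_words : List (Option String)) (merged_boxes : List (Option (Int × Int × Int × Int))) (merged_labels : List (Option String)) (out : List String × (List (Int × Int × Int × Int)) × List String) : Decidable (Spec_post_process_merged_entities merged_words merged_boxes merged_labels out) := by unfold Spec_post_process_merged_entities; infer_instance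

-- ===== CLAIM (what is proved, stated in full; the proofs are below) =====
def Claim_equal_post_process_merged_entities : Prop := ∀ (merged_words : List (Option String)) (merged_boxes : List (Option (Int × Int × Int × Int))) (merged_labels : List (Option String)), Dom_post_process_merged_entities merged_words merged_boxes merged_labels → Spec_post_process_merged_entities merged_words merged_boxes merged_labels (post_process_merged_entities merged_words merged_boxes merged_labels)

-- ===== LEMMAS AND PROOFS =====

-- proof-side abbreviations
abbrev pvState := List (Option String) × List (Option pvBox) × List (Option String)

def pvProj (e : pvEntA) : Int × Int × Int := (e.2.1.1, e.2.1.2.2.1, e.2.2)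

def pvF (kv : String × List pvEntA) : String × List (Int × Int × Int) := (kv.1, kv.2.map pvProj)

-- the indices A's merge loop deletes, read off the sorted entity list in one pass
def pvScanAux : List pvEntA → Int → List Int
  | [], _ => []
  | e :: rest, m =>
      if e.2.1.1 - m < 50 then e.2.2 :: pvScanAux rest (max m e.2.1.2.2.1)
      else pvScanAux rest e.2.1.2.2.1

def pvScanFrom : List pvEntA → List Int
  | [] => []
  | e :: rest => pvScanAux rest e.2.1.2.2.1

def pvSetNone (s : pvState) (i : Int) : pvState :=
  (s.1.set i.toNat none, s.2.1.set i.toNat none, s.2.2.set i.toNat none)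

def pvApplyDel (ds : List Int) (s : pvState) : pvState := ds.foldl pvSetNone s

def pvSortedA (v : List pvEntA) : List pvEntA := PySem.List.sorted v (fun e => e.2.1.1) false

def pvDel (items : List (String × List pvEntA)) : List Int :=
  items.flatMap (fun kv => pvScanFrom (pvSortedA kv.2))

-- ---- merge loop = one scan ----
theorem pv_drop_set_eraseIdx (es : List pvEntA) (j : Nat) (a : pvEntA) (h : j + 1 < es.length) :
    ((es.set j a).eraseIdx (j + 1)).drop j = a :: es.drop (j + 2) := by
  rw [List.eraseIdx_eq_take_drop_succ, List.drop_append, List.drop_take]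
  have hlen : ((es.set j a).take (j+1)).length = j + 1 := by
    simp [List.length_take, List.length_set]; omega
  rw [hlen]
  have h1 : j + 1 - j = 1 := by omega
  have h2 : j - (j+1) = 0 := by omega
  rw [h1, h2, List.drop_zero, List.drop_set]
  simp only [lt_irrefl, if_false, Nat.sub_self]
  have h4 : (es.set j a).drop (j+1+1) = es.drop (j+2) := by
    rw [List.drop_set]; simp
  rw [h4, List.drop_eq_getElem_cons (by omega : j < es.length), List.set_cons_zero]
  simp

theorem pvMergeLoop_eq (fuel : Nat) (es : List pvEntA) (j : Nat) (hf : es.length - j ≤ fuel)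
    (mw : List (Option String)) (mb : List (Option pvBox)) (ml : List (Option String)) :
    pvMergeLoop fuel es j mw mb ml = pvApplyDel (pvScanFrom (es.drop j)) (mw, mb, ml) := by
  induction fuel generalizing es j mw mb ml with
  | zero =>
    have hd : es.drop j = [] := by
      rw [List.drop_eq_nil_iff]; omega
    simp [pvMergeLoop, hd, pvScanFrom, pvApplyDel]
  | succ fuel ih =>
    rw [pvMergeLoop]
    by_cases h : j < es.length - 1
    · rw [dif_pos h]
      set e1 := es[j]'(by omega) with he1
      set e2 := es[j + 1]'(by omega) with he2
      by_cases hcond : e2.2.1.1 - e1.2.1.2.2.1 < 50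
      · rw [if_pos hcond]
        rw [ih _ j (by
          have hj1 : j + 1 < es.length := by omega
          simp [List.length_eraseIdx, List.length_set, hj1]; omega)]
        have hj1 : j + 1 < es.length := by omega
        rw [pv_drop_set_eraseIdx es j _ hj1]
        rw [List.drop_eq_getElem_cons (by omega : j < es.length),
            List.drop_eq_getElem_cons (by omega : j + 1 < es.length)]
        simp only [pvScanFrom, pvScanAux, pvApplyDel]
        rw [if_pos hcond]
        rfl
      · rw [if_neg hcond]
        rw [ih es (j + 1) (by omega)]
        rw [List.drop_eq_getElem_cons (by omega : j < es.length),
            List.drop_eq_getElem_cons (by omega : j + 1 < es.length)]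
        simp only [pvScanFrom, pvScanAux]
        rw [if_neg hcond]
    · rw [dif_neg h]
      have hlen : (es.drop j).length ≤ 1 := by simp [List.length_drop]; omega
      rcases hdrop : es.drop j with _ | ⟨e, rest⟩
      · simp [pvScanFrom, pvApplyDel]
      · rcases rest with _ | ⟨e2, r2⟩
        · simp [pvScanFrom, pvScanAux, pvApplyDel]
        · rw [hdrop] at hlen; simp at hlen

-- ---- sorting commutes with the (x1,x2,idx) projection ----
theorem pv_insertBy_map (x : pvEntA) (ys : List pvEntA) :
    PySem.List.insertBy (fun a b => decide (a.1 < b.1)) (pvProj x) (ys.map pvProj) =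
      (PySem.List.insertBy (fun a b => decide (a.2.1.1 < b.2.1.1)) x ys).map pvProj := by
  induction ys with
  | nil => simp [PySem.List.insertBy, pvProj]
  | cons y t ih =>
    simp only [List.map_cons, PySem.List.insertBy]
    by_cases hc : x.2.1.1 < y.2.1.1
    · simp [pvProj, hc]
    · simp only [pvProj, hc, if_false, decide_false, Bool.false_eq_true,
        List.map_cons]
      exact congrArg _ ih

theorem pv_sorted_map (v : List pvEntA) :
    PySem.List.sorted (v.map pvProj) (fun t => t.1) false = (pvSortedA v).map pvProj := by
  rw [pvSortedA, PySem.List.sorted_eq_foldl_insertBy, PySem.List.sorted_eq_foldl_insertBy]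
  have main : ∀ (v : List pvEntA) (acc : List pvEntA),
      (v.map pvProj).foldl
          (fun acc x => PySem.List.insertBy (fun a b => decide (a.1 < b.1)) x acc) (acc.map pvProj) =
        (v.foldl (fun acc x => PySem.List.insertBy (fun a b => decide (a.2.1.1 < b.2.1.1)) x acc)
            acc).map pvProj := by
    intro v
    induction v with
    | nil => intro acc; simp
    | cons e t ih =>
      intro acc
      simp only [List.map_cons, List.foldl_cons, pv_insertBy_map, ih]
  simpa using main v []

-- ---- B's per-group scan computes pvScanFrom of the sorted A-entities ----
theorem pv_scan_fold (rest : List pvEntA) (m : Int) (del : PySem.Set Int) :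
    ((rest.map pvProj).foldl
        (fun (st : Int × PySem.Set Int) t =>
          if t.1 - st.1 < 50 then (max st.1 t.2.1, PySem.Set.add st.2 t.2.2)
          else (t.2.1, st.2)) (m, del)).2 =
      (pvScanAux rest m).foldl PySem.Set.add del := by
  induction rest generalizing m del with
  | nil => simp [pvScanAux]
  | cons e t ih =>
    simp only [List.map_cons, List.foldl_cons, pvScanAux, pvProj]
    by_cases hc : e.2.1.1 - m < 50
    · simp only [hc, if_pos]
      rw [ih]; rfl
    · simp only [hc, if_false]
      rw [ih]

theorem pvScanGroup_eq (del : PySem.Set Int) (v : List pvEntA) :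
    pvScanGroup del (v.map pvProj) = (pvScanFrom (pvSortedA v)).foldl PySem.Set.add del := by
  unfold pvScanGroup
  rw [pv_sorted_map]
  rcases h : pvSortedA v with _ | ⟨e0, rest⟩
  · simp [pvScanFrom]
  · simp only [List.map_cons]
    have : (pvProj e0).2.1 = e0.2.1.2.2.1 := rfl
    rw [this, pv_scan_fold]
    rfl

-- ---- the two grouping folds build pvF-related dicts ----
theorem pv_get?_map (items : List (String × List pvEntA)) (k : String) :
    (PySem.Dict.mk (items.map pvF)).get? k = ((PySem.Dict.mk items).get? k).map (List.map pvProj) := by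
  induction items with
  | nil => simp [PySem.Dict.get?]
  | cons p t ih =>
    rcases p with ⟨pk, pv⟩
    simp only [List.map_cons, pvF, PySem.Dict.get?_mk_cons]
    by_cases hk : pk == k
    · simp [hk]
    · simp only [hk, Bool.false_eq_true, if_false, ih]

theorem pv_contains_map (d : PySem.Dict String (List pvEntA)) (k : String) :
    (PySem.Dict.mk (d.items.map pvF)).contains k = d.contains k := by
  rw [PySem.Dict.contains_eq_isSome_get?, PySem.Dict.contains_eq_isSome_get?]
  rcases d with ⟨items⟩
  rw [pv_get?_map]
  simp

theorem pv_insert_map (d : PySem.Dict String (List pvEntA)) (k : String) (v : List pvEntA) :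
    ((PySem.Dict.mk (d.items.map pvF)).insert k (v.map pvProj)).items =
      ((d.insert k v).items).map pvF := by
  by_cases hc : d.contains k
  · rw [PySem.Dict.items_insert_of_contains _ _ (by rwa [pv_contains_map]),
        PySem.Dict.items_insert_of_contains _ _ hc]
    simp only [List.map_map, List.map_inj_left]
    intro p _
    by_cases hp : p.1 = k <;> simp [hp, pvF]
  · rw [PySem.Dict.items_insert_of_not_contains _ _ (by rw [pv_contains_map]; simpa using hc),
        PySem.Dict.items_insert_of_not_contains _ _ (by simpa using hc)]
    simp [pvF]

theorem pv_modify_map (d : PySem.Dict String (List pvEntA)) (k : String) (e : pvEntA) :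
    ((PySem.Dict.mk (d.items.map pvF)).modify k [] (· ++ [pvProj e])).items =
      ((d.modify k [] (· ++ [e])).items).map pvF := by
  simp only [PySem.Dict.modify]
  have hg : (PySem.Dict.mk (d.items.map pvF)).getD k [] = (d.getD k []).map pvProj := by
    rw [PySem.Dict.getD_eq_get?_getD, PySem.Dict.getD_eq_get?_getD]
    rcases d with ⟨items⟩
    rw [pv_get?_map]
    rcases (PySem.Dict.mk items).get? k with _ | v <;> simp
  rw [hg]
  have : (d.getD k []).map pvProj ++ [pvProj e] = (d.getD k [] ++ [e]).map pvProj := by simp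
  rw [this, pv_insert_map]

theorem pv_group_fold_map (l : List (Int × pvRow)) (d : PySem.Dict String (List pvEntA)) :
    l.foldl pvGroupStepB (PySem.Dict.mk (d.items.map pvF)) =
      PySem.Dict.mk ((l.foldl pvGroupStepA d).items.map pvF) := by
  induction l generalizing d with
  | nil => simp
  | cons p t ih =>
    rcases p with ⟨i, w, b, lab⟩
    simp only [List.foldl_cons]
    have step : pvGroupStepB (PySem.Dict.mk (d.items.map pvF)) (i, w, b, lab) =
        PySem.Dict.mk ((pvGroupStepA d (i, w, b, lab)).items.map pvF) := by
      rcases lab with _ | lab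
      · rcases w with _ | w <;> rcases b with _ | b <;> simp [pvGroupStepA, pvGroupStepB]
      · rcases w with _ | w <;> rcases b with _ | b
        · simp [pvGroupStepA, pvGroupStepB]
        · simp [pvGroupStepA, pvGroupStepB]
        · simp [pvGroupStepA, pvGroupStepB]
        · by_cases hO : lab = "O"
          · simp [pvGroupStepA, pvGroupStepB, hO]
          · simp only [pvGroupStepA, pvGroupStepB, hO, if_false]
            have := pv_modify_map d lab (w, b, i)
            apply PySem.Dict.ext
            simpa [pvProj] using this
    rw [step, ih]

-- ---- all stored indices are nonnegative ----
def pvIdxOK (d : PySem.Dict String (List pvEntA)) : Prop :=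
  ∀ kv ∈ d.items, ∀ e ∈ kv.2, 0 ≤ e.2.2

theorem pv_group_fold_idxOK (l : List (Int × pvRow)) (d : PySem.Dict String (List pvEntA))
    (hd : pvIdxOK d) (hl : ∀ p ∈ l, 0 ≤ p.1) : pvIdxOK (l.foldl pvGroupStepA d) := by
  induction l generalizing d with
  | nil => exact hd
  | cons p t ih =>
    refine ih _ ?_ (fun q hq => hl q (List.mem_cons_of_mem _ hq))
    have hp : 0 ≤ p.1 := hl p (List.mem_cons_self ..)
    rcases p with ⟨i, w, b, lab⟩
    rcases lab with _ | lab
    · exact hd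
    · by_cases hO : lab = "O"
      · simpa [pvGroupStepA, hO] using hd
      · rcases w with _ | w <;> rcases b with _ | b
        · simpa [pvGroupStepA, hO] using hd
        · simpa [pvGroupStepA, hO] using hd
        · simpa [pvGroupStepA, hO] using hd
        · simp only [pvGroupStepA, hO, if_false]
          intro kv hkv e he
          simp only [PySem.Dict.modify] at hkv
          rcases (PySem.Dict.mem_items_insert ..).1 hkv with heq | ⟨hmem, _⟩
          · subst heq
            rcases List.mem_append.1 he with hg | hg
            · rcases hget : d.get? lab with _ | v0
              · rw [PySem.Dict.getD_of_get?_eq_none d [] hget] at hg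
                simp at hg
              · rw [PySem.Dict.getD_of_get?_eq_some d [] hget] at hg
                exact hd (lab, v0) (PySem.Dict.mem_items_of_get?_eq_some _ hget) e hg
            · simp at hg
              subst hg
              exact hp
          · exact hd kv hmem e he

theorem pv_scanAux_mem (rest : List pvEntA) (m : Int) (x : Int) (hx : x ∈ pvScanAux rest m) :
    ∃ e ∈ rest, x = e.2.2 := by
  induction rest generalizing m with
  | nil => simp [pvScanAux] at hx
  | cons e t ih =>
    simp only [pvScanAux] at hx
    split at hx
    · rcases List.mem_cons.1 hx with h1 | h1
      · exact ⟨e, List.mem_cons_self .., h1⟩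
      · obtain ⟨e', he', hx'⟩ := ih _ h1
        exact ⟨e', List.mem_cons_of_mem _ he', hx'⟩
    · obtain ⟨e', he', hx'⟩ := ih _ hx
      exact ⟨e', List.mem_cons_of_mem _ he', hx'⟩

theorem pvDel_nonneg (l : List (Int × pvRow)) (hl : ∀ p ∈ l, 0 ≤ p.1) :
    ∀ x ∈ pvDel (l.foldl pvGroupStepA PySem.Dict.empty).items, 0 ≤ x := by
  intro x hx
  have hok : pvIdxOK (l.foldl pvGroupStepA PySem.Dict.empty) := by
    refine pv_group_fold_idxOK l _ ?_ hl
    intro kv hkv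
    simp [PySem.Dict.empty] at hkv
  simp only [pvDel, List.mem_flatMap] at hx
  obtain ⟨kv, hkv, hxs⟩ := hx
  rcases hsort : pvSortedA kv.2 with _ | ⟨e0, rest⟩
  · rw [hsort] at hxs; simp [pvScanFrom] at hxs
  · rw [hsort] at hxs
    simp only [pvScanFrom] at hxs
    obtain ⟨e, he, hxe⟩ := pv_scanAux_mem rest _ x hxs
    have hmem : e ∈ pvSortedA kv.2 := by rw [hsort]; exact List.mem_cons_of_mem _ he
    have : e ∈ kv.2 := (PySem.List.mem_sorted _ _ _ _).1 hmem
    subst hxe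
    exact hok kv hkv e this

-- ---- A's middle fold is pvApplyDel of pvDel ----
theorem pv_middle_fold (items : List (String × List pvEntA)) (s : pvState) :
    items.foldl
        (fun (s : pvState) kv =>
          if kv.2.length ≤ 1 then s
          else
            pvMergeLoop (PySem.List.sorted kv.2 (fun e => e.2.1.1) false).length
              (PySem.List.sorted kv.2 (fun e => e.2.1.1) false) 0 s.1 s.2.1 s.2.2) s =
      pvApplyDel (pvDel items) s := by
  induction items generalizing s with
  | nil => simp [pvDel, pvApplyDel]
  | cons kv t ih =>
    simp only [List.foldl_cons, pvDel, List.flatMap_cons, pvApplyDel, List.foldl_append]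
    by_cases hlen : kv.2.length ≤ 1
    · have hscan : pvScanFrom (pvSortedA kv.2) = [] := by
        have hl : (pvSortedA kv.2).length ≤ 1 := by
          rw [pvSortedA, PySem.List.length_sorted]; exact hlen
        rcases h : pvSortedA kv.2 with _ | ⟨e, rest⟩
        · simp [pvScanFrom]
        · rcases rest with _ | ⟨e2, r2⟩
          · simp [pvScanFrom, pvScanAux]
          · rw [h] at hl; simp at hl
      rw [if_pos hlen, hscan]
      simpa [pvDel, pvApplyDel] using ih s
    · rw [if_neg hlen]
      rw [pvMergeLoop_eq _ _ _ (by omega)]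
      have := ih (pvApplyDel (pvScanFrom (pvSortedA kv.2)) s)
      simpa [pvDel, pvApplyDel, pvSortedA] using this

-- ---- B's deleted set is pvDel as a set ----
theorem pv_deleted_fold (items : List (String × List pvEntA)) (del : PySem.Set Int) :
    (items.map pvF).foldl (fun del kv => pvScanGroup del kv.2) del =
      (pvDel items).foldl PySem.Set.add del := by
  induction items generalizing del with
  | nil => simp [pvDel]
  | cons kv t ih =>
    simp only [List.map_cons, List.foldl_cons, pvDel, List.flatMap_cons, List.foldl_append]
    rw [show (pvF kv).2 = kv.2.map pvProj from rfl, pvScanGroup_eq]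
    simpa [pvDel] using ih ((pvScanFrom (pvSortedA kv.2)).foldl PySem.Set.add del)

-- ---- pointwise effect of the deletions ----
theorem pv_foldl_set_getElem? {α : Type} (ds : List Int) (l : List (Option α)) (k : Nat)
    (h0 : ∀ x ∈ ds, 0 ≤ x) :
    (ds.foldl (fun l i => l.set i.toNat (none : Option α)) l)[k]? =
      if (k : Int) ∈ ds then l[k]?.map (fun _ => none) else l[k]? := by
  induction ds generalizing l with
  | nil => simp
  | cons i rest ih =>
    have hi : 0 ≤ i := h0 i (List.mem_cons_self ..)
    simp only [List.foldl_cons]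
    rw [ih (l.set i.toNat none) (fun x hx => h0 x (List.mem_cons_of_mem _ hx))]
    by_cases hik : (k : Int) = i
    · have hk : i.toNat = k := by omega
      have hset : (l.set i.toNat none)[k]? = l[k]?.map (fun _ => none) := by
        rw [List.getElem?_set, if_pos hk]
        rcases Nat.lt_or_ge k l.length with hlt | hge
        · rw [if_pos (hk ▸ hlt), List.getElem?_eq_getElem hlt]; rfl
        · rw [if_neg (by omega), List.getElem?_eq_none (by omega)]; rfl
      by_cases hmem : (k : Int) ∈ rest
      · rw [if_pos hmem, if_pos (by simp [hmem]), hset]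
        rcases l[k]? with _ | v <;> rfl
      · rw [if_neg hmem, if_pos (by simp [hik]), hset]
    · have hne : i.toNat ≠ k := by omega
      rw [List.getElem?_set_ne hne]
      by_cases hmem : (k : Int) ∈ rest
      · rw [if_pos hmem, if_pos (by simp [hmem])]
      · rw [if_neg hmem, if_neg (by simp [hik, hmem])]

theorem pvApplyDel_comp (ds : List Int) (s : pvState) :
    pvApplyDel ds s =
      (ds.foldl (fun l i => l.set i.toNat none) s.1,
       ds.foldl (fun l i => l.set i.toNat none) s.2.1,
       ds.foldl (fun l i => l.set i.toNat none) s.2.2) := by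
  induction ds generalizing s with
  | nil => simp [pvApplyDel]
  | cons i rest ih =>
    simp only [pvApplyDel, List.foldl_cons] at ih ⊢
    rw [ih (pvSetNone s i)]
    rfl

theorem pv_foldl_set_length {α : Type} (ds : List Int) (l : List (Option α)) :
    (ds.foldl (fun l i => l.set i.toNat (none : Option α)) l).length = l.length := by
  induction ds generalizing l with
  | nil => rfl
  | cons i rest ih => simp only [List.foldl_cons]; rw [ih]; simp

theorem pv_foldl_set_getElem {α : Type} (ds : List Int) (l : List (Option α)) (k : Nat)
    (h0 : ∀ x ∈ ds, 0 ≤ x) (hk : k < l.length) :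
    (ds.foldl (fun l i => l.set i.toNat (none : Option α)) l)[k]'(by
        rw [pv_foldl_set_length]; exact hk) =
      if (k : Int) ∈ ds then none else l[k] := by
  have hq := pv_foldl_set_getElem? ds l k h0
  rw [List.getElem?_eq_getElem (by rw [pv_foldl_set_length]; exact hk),
      List.getElem?_eq_getElem hk] at hq
  by_cases hm : (k : Int) ∈ ds
  · rw [if_pos hm] at hq ⊢
    exact Option.some.inj (by simpa using hq)
  · rw [if_neg hm] at hq ⊢
    exact Option.some.inj hq

theorem pv_zip3_applyDel (ds : List Int) (mw : List (Option String)) (mb : List (Option pvBox))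
    (ml : List (Option String)) (h0 : ∀ x ∈ ds, 0 ≤ x) :
    ((pvApplyDel ds (mw, mb, ml)).1.zip
        ((pvApplyDel ds (mw, mb, ml)).2.1.zip (pvApplyDel ds (mw, mb, ml)).2.2)) =
      (PySem.List.enumerate (mw.zip (mb.zip ml))).map
        (fun p => if p.1 ∈ ds then ((none, none, none) : pvRow) else p.2) := by
  rw [pvApplyDel_comp]
  apply List.ext_getElem
  · simp [PySem.List.length_enumerate, pv_foldl_set_length]
  · intro k h1 h2
    have hkw : k < mw.length := by
      simp only [List.length_zip, pv_foldl_set_length] at h1; omega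
    have hkb : k < mb.length := by
      simp only [List.length_zip, pv_foldl_set_length] at h1; omega
    have hkl : k < ml.length := by
      simp only [List.length_zip, pv_foldl_set_length] at h1; omega
    rw [List.getElem_map, PySem.List.getElem_enumerate, List.getElem_zip, List.getElem_zip,
        List.getElem_zip, List.getElem_zip]
    rw [pv_foldl_set_getElem ds mw k h0 hkw, pv_foldl_set_getElem ds mb k h0 hkb,
        pv_foldl_set_getElem ds ml k h0 hkl]
    have h00 : (0 : Int) + (k : Int) = (k : Int) := by omega
    by_cases hm : (k : Int) ∈ ds
    · simp [h00, hm]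
    · simp [h00, hm]

-- ===== VERDICT (by name: the statement is the Claim_ definition above) =====
theorem post_process_merged_entities_spec : Claim_equal_post_process_merged_entities := by
  unfold Claim_equal_post_process_merged_entities
  intro mw mb ml _hdom
  unfold Spec_post_process_merged_entities
  by_cases hmw : mw = []
  · subst hmw; rfl
  · unfold post_process_merged_entities post_process_merged_entities_alt
    rw [if_neg hmw]
    simp only []
    have hidx : ∀ p ∈ PySem.List.enumerate (mw.zip (mb.zip ml)), 0 ≤ p.1 := by
      intro p hp
      rw [PySem.List.mem_enumerate_iff] at hp
      obtain ⟨kk, hkk, rfl⟩ := hp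
      simp
    have h0 : ∀ x ∈ pvDel ((PySem.List.enumerate (mw.zip (mb.zip ml))).foldl pvGroupStepA
        PySem.Dict.empty).items, 0 ≤ x := pvDel_nonneg _ hidx
    rw [pv_middle_fold, pv_zip3_applyDel _ mw mb ml h0, List.foldl_map]
    have hempty : PySem.Dict.empty =
        PySem.Dict.mk ((PySem.Dict.empty : PySem.Dict String (List pvEntA)).items.map pvF) := rfl
    rw [show ((PySem.List.enumerate (mw.zip (mb.zip ml))).foldl pvGroupStepB PySem.Dict.empty) =
        PySem.Dict.mk (((PySem.List.enumerate (mw.zip (mb.zip ml))).foldl pvGroupStepA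
          PySem.Dict.empty).items.map pvF) from
      (hempty ▸ pv_group_fold_map (PySem.List.enumerate (mw.zip (mb.zip ml))) PySem.Dict.empty)]
    rw [show (PySem.Dict.mk (((PySem.List.enumerate (mw.zip (mb.zip ml))).foldl pvGroupStepA
        PySem.Dict.empty).items.map pvF)).items =
        ((PySem.List.enumerate (mw.zip (mb.zip ml))).foldl pvGroupStepA
          PySem.Dict.empty).items.map pvF from rfl]
    rw [pv_deleted_fold]
    apply PySem.List.foldl_congr_mem
    intro acc p _hp
    have hcont : PySem.Set.contains
        ((pvDel ((PySem.List.enumerate (mw.zip (mb.zip ml))).foldl pvGroupStepA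
          PySem.Dict.empty).items).foldl PySem.Set.add PySem.Set.empty) p.1 =
        decide (p.1 ∈ pvDel ((PySem.List.enumerate (mw.zip (mb.zip ml))).foldl pvGroupStepA
          PySem.Dict.empty).items) := by
      rw [show (PySem.Set.empty : PySem.Set Int) = [] from rfl, ← PySem.Set.ofList_eq_foldl]
      simp [PySem.Set.contains]
    by_cases hm : p.1 ∈ pvDel ((PySem.List.enumerate (mw.zip (mb.zip ml))).foldl pvGroupStepA
        PySem.Dict.empty).items
    · rw [if_pos hm, hcont]
      simp only [hm, decide_true, if_true]
    · rw [if_neg hm, hcont]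
      simp only [hm, decide_false, Bool.false_eq_true, if_false]
      rcases p with ⟨i, w, b, l⟩
      rcases w with _ | w <;> rcases b with _ | b <;> rcases l with _ | l <;> rfl
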